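-- pv_equiv track=rewrite | github.com/1van101/SoftUni-Fundamentals | python_fundamentals/more_exercises/03_list_basics_more_exercises/list_manipulator.py | get_last_even_or_odd
-- ===== SOURCE A (Python) =====
-- def get_last_even_or_odd(command, list, i):
--     if "even" in command:
--         if i > len(list):
--             return "Invalid count"
--         else:
--             list = [x for x in list if x % 2 == 0]
--             new_list = []
--             if len(list) == len(new_list):
--                 return new_list
--             j = len(list) - 1
--             while i > 0:
--                 i -= 1
--                 new_list.append(list[j])
--                 j -= 1
--                 if len(list) == len(new_list):
--                     return new_list[::-1]
--             return new_list[::-1]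
--     else:
--         if i > len(list):
--             return "Invalid count"
--         else:
--             list = [x for x in list if x % 2 != 0]
--             new_list = []
--             if len(list) == len(new_list):
--                 return new_list
--             j = len(list) - 1
--             while i > 0:
--                 i -= 1
--                 new_list.append(list[j])
--                 j -= 1
--                 if len(list) == len(new_list):
--                     return new_list[::-1]
--             return new_list[::-1]
-- ===== SOURCE B (Python) =====
-- def get_last_even_or_odd(command, list, i):
--     if i > len(list):
--         return "Invalid count"
--     r = 0 if "even" in command else 1
--     need = max(i, 0)
--     out = []
--     for x in reversed(list):
--         if len(out) == need:
--             break
--         if x % 2 == r: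
--             out.append(x)
--     out.reverse()
--     return out
-- ===== Notes on version B (the rewrite author's own statement) =====
-- stated objective: alternative
-- what changed: A filters the whole list by parity and then walks it backwards by index, appending and re-reversing; B makes one backward pass over the original list, collecting matching elements and stopping as soon as max(i,0) are found, then reverses the collected window.
-- outside the precondition, e.g. on get_last_even_or_odd('even', [2, 4], 5): A returns 'Invalid count', B returns 'Invalid count'
import Mathlib
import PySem

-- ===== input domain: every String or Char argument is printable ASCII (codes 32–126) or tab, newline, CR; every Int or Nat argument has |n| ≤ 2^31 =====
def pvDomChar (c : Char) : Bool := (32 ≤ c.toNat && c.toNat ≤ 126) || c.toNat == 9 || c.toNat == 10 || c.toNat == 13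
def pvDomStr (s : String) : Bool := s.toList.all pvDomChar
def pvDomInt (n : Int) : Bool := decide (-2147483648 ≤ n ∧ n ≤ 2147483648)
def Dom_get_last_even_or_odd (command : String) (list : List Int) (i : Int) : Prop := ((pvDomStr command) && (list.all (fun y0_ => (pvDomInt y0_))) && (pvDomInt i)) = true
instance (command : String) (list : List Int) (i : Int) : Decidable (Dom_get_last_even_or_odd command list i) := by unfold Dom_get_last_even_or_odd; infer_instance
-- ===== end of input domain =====

-- B replaces A's filter-everything-then-walk-backwards-by-index shape with a single backward scan
-- that collects matching elements and stops as soon as max(i,0) are found (objective: alternative).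


-- ===== PORT A =====
-- A's 'while i > 0' loop, state (new_list, i, j); list[j] is PySem.List.pyGet? (in range on every
-- state the program reaches — proved below; the .getD 0 only makes the definition total)
def pvALoop (lst newl : List Int) (i j : Int) : List Int :=
  if _h : 0 < i then
    let i' := i - 1
    let newl' := newl ++ [(PySem.List.pyGet? lst j).getD 0]
    let j' := j - 1
    if lst.length = newl'.length then newl'.reverse
    else pvALoop lst newl' i' j'
  else newl.reverse
termination_by i.toNat
decreasing_by omega

def get_last_even_or_odd (command : String) (list : List Int) (i : Int) : List Int :=
  if PySem.Str.isIn "even" command then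
    if i > (list.length : Int) then []   -- Python returns the STRING "Invalid count" here; excluded by Pre_
    else
      let lst := list.filter (fun x => PySem.Int.mod x 2 == 0)
      let new_list : List Int := []
      if lst.length = new_list.length then new_list
      else pvALoop lst new_list i ((lst.length : Int) - 1)
  else
    if i > (list.length : Int) then []   -- Python returns the STRING "Invalid count" here; excluded by Pre_
    else
      let lst := list.filter (fun x => !(PySem.Int.mod x 2 == 0))
      let new_list : List Int := []
      if lst.length = new_list.length then new_list
      else pvALoop lst new_list i ((lst.length : Int) - 1)

-- ===== PORT B =====
-- B's backward scan: collect matches into 'out' until 'need' of them are found, then stop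
def pvBLoop (r : Int) (need : Int) (xs : List Int) (out : List Int) : List Int :=
  match xs with
  | [] => out
  | x :: rest =>
    if (out.length : Int) = need then out
    else if PySem.Int.mod x 2 == r then pvBLoop r need rest (out ++ [x])
    else pvBLoop r need rest out

def get_last_even_or_odd_alt (command : String) (list : List Int) (i : Int) : List Int :=
  if i > (list.length : Int) then []   -- Python returns the STRING "Invalid count" here; excluded by Pre_
  else
    let r : Int := if PySem.Str.isIn "even" command then 0 else 1
    let need := max i 0
    (pvBLoop r need list.reverse []).reverse

-- ===== PRECONDITION & SPEC =====
-- Pre_ excludes exactly the inputs with i > len(list), on which A returns the string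
-- "Invalid count" — not a value of the declared return type List Int.
def Pre_get_last_even_or_odd (_command : String) (list : List Int) (i : Int) : Prop :=
  i ≤ (list.length : Int)
instance (command : String) (list : List Int) (i : Int) : Decidable (Pre_get_last_even_or_odd command list i) := by unfold Pre_get_last_even_or_odd; infer_instance

def pvWitness_get_last_even_or_odd : String × List Int × Int := ("even", [1, 2, 3, 4], 2)

def Spec_get_last_even_or_odd (command : String) (list : List Int) (i : Int) (out : List Int) : Prop := out = get_last_even_or_odd_alt command list i
instance (command : String) (list : List Int) (i : Int) (out : List Int) : Decidable (Spec_get_last_even_or_odd command list i out) := by unfold Spec_get_last_even_or_odd; infer_instance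

-- ===== CLAIM (what is proved, stated in full; the proofs are below) =====
def Claim_equal_get_last_even_or_odd : Prop := ∀ (command : String) (list : List Int) (i : Int), Dom_get_last_even_or_odd command list i → Pre_get_last_even_or_odd command list i → Spec_get_last_even_or_odd command list i (get_last_even_or_odd command list i)

-- ===== LEMMAS AND PROOFS =====

-- A's loop on state (newl = reverse of the last (len f - k) elements, j = k - 1)
-- returns the last min(i, k) elements of f; in particular list[j] never leaves the list.
theorem pvALoop_eq (f : List Int) :
    ∀ (n : Nat) (i : Int), i.toNat = n → ∀ k : Nat, 0 < k → k ≤ f.length →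
    pvALoop f (f.drop k).reverse i ((k : Int) - 1) = f.drop (k - min n k) := by
  intro n
  induction n with
  | zero =>
    intro i hi k hk hkl
    rw [pvALoop, dif_neg (by omega)]
    simp
  | succ n ih =>
    intro i hi k hk hkl
    have hk1 : k - 1 < f.length := by omega
    have hget : (PySem.List.pyGet? f ((k : Int) - 1)).getD 0 = f[k-1] := by
      have : ((k : Int) - 1) = ((k - 1 : Nat) : Int) := by omega
      rw [this, PySem.List.pyGet?_natCast, List.getElem?_eq_getElem hk1]
      rfl
    have hdrop : f.drop k = f.drop (k - 1 + 1) := by congr 1; omega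
    have hnewl : (f.drop k).reverse ++ [(PySem.List.pyGet? f ((k:Int)-1)).getD 0]
        = (f.drop (k-1)).reverse := by
      rw [hget, hdrop, List.drop_eq_getElem_cons hk1, List.reverse_cons]
    rw [pvALoop, dif_pos (by omega)]
    simp only [hnewl]
    by_cases hk2 : k = 1
    · subst hk2
      rw [if_pos (by simp)]
      simp
    · rw [if_neg (by simp [List.length_drop]; omega)]
      have hj : (k : Int) - 1 - 1 = ((k - 1 : Nat) : Int) - 1 := by omega
      rw [hj, ih (i - 1) (by omega) (k - 1) (by omega) (by omega)]
      congr 1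
      omega

-- B's loop appends to 'out' the first (need - out.length) matches of ys.
theorem pvBLoop_eq (r : Int) (need : Nat) :
    ∀ (ys out : List Int), out.length ≤ need →
    pvBLoop r (need : Int) ys out = out ++ (ys.filter (fun x => PySem.Int.mod x 2 == r)).take (need - out.length) := by
  intro ys
  induction ys with
  | nil => intro out h; simp [pvBLoop]
  | cons x rest ih =>
    intro out h
    rw [pvBLoop]
    by_cases he : out.length = need
    · rw [if_pos (by omega)]
      simp [he]
    · rw [if_neg (by omega)]
      have hlt : out.length < need := by omega
      by_cases hp : PySem.Int.mod x 2 == r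
      · rw [if_pos hp, ih (out ++ [x]) (by simp; omega)]
        have h1 : need - out.length = (need - (out ++ [x]).length) + 1 := by simp; omega
        simp only [List.filter_cons, hp, h1]
        simp
      · rw [if_neg hp, ih out (by omega)]
        simp only [List.filter_cons, hp]
        simp

-- Python's x % 2 != 0 is x % 2 == 1 (PySem.Int.mod with divisor 2 is 0 or 1)
theorem pvOddPred (x : Int) : (!(PySem.Int.mod x 2 == 0)) = (PySem.Int.mod x 2 == 1) := by
  have h0 := PySem.Int.mod_nonneg x (b := 2) (by omega)
  have h1 := PySem.Int.mod_lt x (b := 2) (by omega)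
  interval_cases h : PySem.Int.mod x 2 <;> simp

-- shared shape of A's two branches, in terms of the filtered list g
theorem pvSide (g : List Int) (i : Int) :
    (if g.length = 0 then ([] : List Int)
     else pvALoop g [] i ((g.length : Int) - 1))
    = (g.reverse.take i.toNat).reverse := by
  by_cases hg : g.length = 0
  · simp [List.eq_nil_of_length_eq_zero hg]
  · rw [if_neg hg]
    have h0 : ([] : List Int) = (g.drop g.length).reverse := by simp
    rw [h0, pvALoop_eq g i.toNat i rfl g.length (by omega) le_rfl]
    rw [List.take_reverse, List.reverse_reverse]
    congr 1
    omega

theorem pvMain : ∀ (command : String) (list : List Int) (i : Int),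
    i ≤ (list.length : Int) →
    get_last_even_or_odd command list i = get_last_even_or_odd_alt command list i := by
  intro command list i hpre
  have hgt : ¬ i > (list.length : Int) := by omega
  have hneed : (max i 0) = ((i.toNat : Nat) : Int) := by omega
  simp only [get_last_even_or_odd, get_last_even_or_odd_alt]
  by_cases hc : PySem.Str.isIn "even" command
  · rw [if_pos hc, if_neg hgt, if_neg hgt, if_pos hc, hneed,
      pvBLoop_eq 0 i.toNat list.reverse [] (by simp)]
    simp only [List.nil_append, List.length_nil, Nat.sub_zero, List.filter_reverse]
    exact pvSide _ i
  · rw [if_neg hc, if_neg hgt, if_neg hgt, if_neg hc, hneed,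
      pvBLoop_eq 1 i.toNat list.reverse [] (by simp)]
    simp only [List.nil_append, List.length_nil, Nat.sub_zero, List.filter_reverse]
    have hf : (list.filter fun x => PySem.Int.mod x 2 == 1)
         = (list.filter fun x => !(PySem.Int.mod x 2 == 0)) := by
      apply List.filter_congr; intro x _; exact (pvOddPred x).symm
    rw [hf]
    exact pvSide _ i

-- ===== VERDICT (by name: the statement is the Claim_ definition above) =====
theorem get_last_even_or_odd_spec : Claim_equal_get_last_even_or_odd := by
  intro command list i _hdom hpre
  exact pvMain command list i hpre
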